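-- pv_equiv track=rewrite | github.com/dowsy/N-Queen-Exercise | main.py | check_diag
-- ===== SOURCE A (Python) =====
-- N = 5
--
-- def check_diag(a,b,dir_x,dir_y):
--   vec = []
--   x = a
--   y = b
--   while (x+dir_x in range(N) and y + dir_y in range(N)):
--     vec.append([x+dir_x, y+dir_y])
--     x += dir_x
--     y += dir_y
--   return vec
-- ===== SOURCE B (Python) =====
-- N = 5
--
-- def check_diag(a, b, dir_x, dir_y):
--     def bound(p, d):
--         if not 0 <= p + d < N:
--             return 0
--         if d > 0:
--             return (N - 1 - p) // d
--         if d < 0: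
--             return p // (-d)
--         return None  # d == 0 and p+d in range: no bound on this axis
--     bounds = [v for v in (bound(a, dir_x), bound(b, dir_y)) if v is not None]
--     n = min(bounds)
--     return [[a + i * dir_x, b + i * dir_y] for i in range(1, n + 1)]
-- ===== Notes on version B (the rewrite author's own statement) =====
-- stated objective: simpler
-- what changed: A walks cell by cell with a per-step in-range test; B computes the number of steps per axis in closed form (distance to the board edge divided by the step), takes the minimum, and builds the list in one fixed-length comprehension.
import Mathlib
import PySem

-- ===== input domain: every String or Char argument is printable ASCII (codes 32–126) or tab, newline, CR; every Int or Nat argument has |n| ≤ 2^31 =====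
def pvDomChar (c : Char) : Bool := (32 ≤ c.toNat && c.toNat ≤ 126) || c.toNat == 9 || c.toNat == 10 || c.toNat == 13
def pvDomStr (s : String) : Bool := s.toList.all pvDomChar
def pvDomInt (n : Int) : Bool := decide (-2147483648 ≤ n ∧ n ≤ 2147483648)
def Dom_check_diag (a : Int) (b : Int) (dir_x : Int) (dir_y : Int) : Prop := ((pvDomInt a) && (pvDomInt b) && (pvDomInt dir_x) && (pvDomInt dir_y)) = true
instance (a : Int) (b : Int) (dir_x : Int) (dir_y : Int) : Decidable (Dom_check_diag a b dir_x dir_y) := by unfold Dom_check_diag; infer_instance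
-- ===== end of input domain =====

-- B replaces A's step-by-step while loop (append while the next cell is on the board) by a
-- closed-form step count per axis and one fixed-length comprehension; objective: simpler.

-- ===== PORT A =====
-- A's while loop, step for step.  The fuel only makes the loop total: whenever the Python
-- loop terminates it runs at most 5 iterations (each appended cell lies on the 5×5 board and
-- the moving coordinate is strictly monotone), so fuel 6 is never exhausted inside Pre_;
-- the sole diverging case (dir_x = dir_y = 0 with (a,b) on the board) is excluded by Pre_.
def check_diag_loop (fuel : Nat) (dir_x dir_y : Int) (x y : Int) (vec : List (List Int)) : List (List Int) :=
  match fuel with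
  | 0 => vec
  | f + 1 =>
    if (0 ≤ x + dir_x ∧ x + dir_x < 5) ∧ (0 ≤ y + dir_y ∧ y + dir_y < 5) then
      check_diag_loop f dir_x dir_y (x + dir_x) (y + dir_y) (vec ++ [[x + dir_x, y + dir_y]])
    else vec

def check_diag (a : Int) (b : Int) (dir_x : Int) (dir_y : Int) : List (List Int) :=
  check_diag_loop 6 dir_x dir_y a b []

-- ===== PORT B =====
-- helper `bound` of Source B: number of steps this axis allows (none = no bound, d = 0 in range)
def cdBound (p d : Int) : Option Int :=
  if ¬ (0 ≤ p + d ∧ p + d < 5) then some 0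
  else if d > 0 then some (PySem.Int.floordiv (5 - 1 - p) d)
  else if d < 0 then some (PySem.Int.floordiv p (-d))
  else none

def check_diag_alt (a : Int) (b : Int) (dir_x : Int) (dir_y : Int) : List (List Int) :=
  let n : Int :=
    match cdBound a dir_x, cdBound b dir_y with
    | some u, some v => min u v
    | some u, none   => u
    | none,   some v => v
    | none,   none   => 0   -- Source B raises ValueError (min of empty list); outside Pre_
  (PySem.List.pyRange 1 (n + 1) 1).map (fun i => [a + i * dir_x, b + i * dir_y])

-- ===== PRECONDITION & SPEC =====
-- Pre_ excludes only dir_x = dir_y = 0 with (a,b) on the 5×5 board: there A's while loop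
-- never terminates (and B raises ValueError), so A returns on no input outside Pre_.
def Pre_check_diag (a : Int) (b : Int) (dir_x : Int) (dir_y : Int) : Prop :=
  ¬ (dir_x = 0 ∧ dir_y = 0 ∧ 0 ≤ a ∧ a < 5 ∧ 0 ≤ b ∧ b < 5)
instance (a : Int) (b : Int) (dir_x : Int) (dir_y : Int) : Decidable (Pre_check_diag a b dir_x dir_y) := by unfold Pre_check_diag; infer_instance

def pvWitness_check_diag : Int × Int × Int × Int := (2, 3, 1, -1)

def Spec_check_diag (a : Int) (b : Int) (dir_x : Int) (dir_y : Int) (out : List (List Int)) : Prop := out = check_diag_alt a b dir_x dir_y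
instance (a : Int) (b : Int) (dir_x : Int) (dir_y : Int) (out : List (List Int)) : Decidable (Spec_check_diag a b dir_x dir_y out) := by unfold Spec_check_diag; infer_instance

-- ===== CLAIM (what is proved, stated in full; the proofs are below) =====
def Claim_equal_check_diag : Prop := ∀ (a : Int) (b : Int) (dir_x : Int) (dir_y : Int), Dom_check_diag a b dir_x dir_y → Pre_check_diag a b dir_x dir_y → Spec_check_diag a b dir_x dir_y (check_diag a b dir_x dir_y)

-- ===== LEMMAS AND PROOFS =====

-- the value `n` of Source B: the min of the defined per-axis bounds
def cdMin : Option Int → Option Int → Option Int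
  | some u, some v => some (min u v)
  | some u, none   => some u
  | none,   some v => some v
  | none,   none   => none

lemma cdBound_none_iff (p d : Int) : cdBound p d = none ↔ (d = 0 ∧ 0 ≤ p ∧ p < 5) := by
  unfold cdBound
  split_ifs with h1 h2 h3 <;> simp <;> omega

lemma cdBound_brackets_pos {p d k : Int} (hd : d > 0)
    (h : PySem.Int.floordiv (5 - 1 - p) d = k) : k * d ≤ 4 - p ∧ 4 - p < (k + 1) * d := by
  have := (PySem.Int.floordiv_eq_iff_of_pos hd).mp h
  constructor <;> nlinarith [this.1, this.2]

lemma cdBound_brackets_neg {p d k : Int} (hd : d < 0)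
    (h : PySem.Int.floordiv p (-d) = k) : k * (-d) ≤ p ∧ p < (k + 1) * (-d) := by
  have hdp : (0:Int) < -d := by omega
  have := (PySem.Int.floordiv_eq_iff_of_pos hdp).mp h
  exact ⟨this.1, this.2⟩

lemma cdBound_bounds {p d k : Int} (h : cdBound p d = some k) : 0 ≤ k ∧ k ≤ 5 := by
  unfold cdBound at h
  split_ifs at h with h1 h2 h3 <;> simp at h
  · obtain ⟨hl, hr⟩ := cdBound_brackets_pos h2 h
    constructor <;> nlinarith
  · obtain ⟨hl, hr⟩ := cdBound_brackets_neg h3 h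
    constructor <;> nlinarith
  · omega

lemma cdBound_zero_iff {p d k : Int} (h : cdBound p d = some k) :
    (k = 0 ↔ ¬ (0 ≤ p + d ∧ p + d < 5)) := by
  unfold cdBound at h
  split_ifs at h with h1 h2 h3 <;> simp at h
  · obtain ⟨hl, hr⟩ := cdBound_brackets_pos h2 h
    constructor <;> intro hk
    · nlinarith
    · exact absurd h1 hk
  · obtain ⟨hl, hr⟩ := cdBound_brackets_neg h3 h
    have : (0:Int) < -d := by omega
    constructor <;> intro hk
    · nlinarith
    · exact absurd h1 hk
  · omega

lemma cdBound_step {p d k : Int} (h : cdBound p d = some k) (hk : 0 < k) :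
    cdBound (p + d) d = some (k - 1) := by
  have hcond : 0 ≤ p + d ∧ p + d < 5 := by
    by_contra hc; exact absurd ((cdBound_zero_iff h).mpr hc) (by omega)
  unfold cdBound at h
  rw [if_neg (not_not_intro hcond)] at h
  rcases lt_trichotomy d 0 with hd | hd | hd
  · rw [if_neg (by omega), if_pos hd] at h
    simp at h
    obtain ⟨hl, hr⟩ := cdBound_brackets_neg hd h
    unfold cdBound
    split_ifs with g1 g2
    · omega
    · simp
      apply (PySem.Int.floordiv_eq_iff_of_pos (by omega : (0:Int) < -d)).mpr
      constructor <;> nlinarith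
    · -- next cell off the board: k = 1
      have h2d : k * (-d) < 2 * (-d) := by omega
      have hk2 : k < 2 := lt_of_mul_lt_mul_right h2d (by omega)
      simp; omega
  · subst hd; simp at h
  · rw [if_pos hd] at h
    simp at h
    obtain ⟨hl, hr⟩ := cdBound_brackets_pos hd h
    unfold cdBound
    split_ifs with g1
    · simp
      apply (PySem.Int.floordiv_eq_iff_of_pos hd).mpr
      constructor <;> nlinarith
    · -- next cell off the board: k = 1
      have h2d : k * d < 2 * d := by omega
      have hk2 : k < 2 := lt_of_mul_lt_mul_right h2d (by omega)
      simp; omega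

lemma cdMin_some_cases {u v : Option Int} {m : Int}
    (h : cdMin u v = some m) :
    (u = some m ∧ (v = none ∨ ∃ k, v = some k ∧ m ≤ k)) ∨
    (v = some m ∧ (u = none ∨ ∃ k, u = some k ∧ m ≤ k)) := by
  match u, v with
  | some a, some b =>
    simp [cdMin] at h
    rcases min_cases a b with ⟨h1, h2⟩ | ⟨h1, h2⟩ <;>
      [left; right] <;> subst h <;> simp [h1] <;> omega
  | some a, none => simp [cdMin] at h; left; simp [h]
  | none, some b => simp [cdMin] at h; right; simp [h]
  | none, none => simp [cdMin] at h

-- main loop characterisation: if the combined bound is m < fuel, A's loop appends exactly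
-- the m cells of the closed form
lemma loop_eq (dx dy : Int) : ∀ (m : Nat) (fuel : Nat) (x y : Int) (vec : List (List Int)),
    cdMin (cdBound x dx) (cdBound y dy) = some (m : Int) → m < fuel →
    check_diag_loop fuel dx dy x y vec =
      vec ++ (List.range m).map (fun (i : Nat) => [x + ((i : Int) + 1) * dx, y + ((i : Int) + 1) * dy]) := by
  intro m
  induction m with
  | zero =>
    intro fuel x y vec hmin hf
    have hguard : ¬ ((0 ≤ x + dx ∧ x + dx < 5) ∧ (0 ≤ y + dy ∧ y + dy < 5)) := by
      rcases cdMin_some_cases hmin with ⟨hx, _⟩ | ⟨hy, _⟩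
      · intro hc; exact absurd ((cdBound_zero_iff hx).mp rfl) (by tauto)
      · intro hc; exact absurd ((cdBound_zero_iff hy).mp rfl) (by tauto)
    match fuel with
    | f + 1 => simp [check_diag_loop, hguard]
  | succ m ih =>
    intro fuel x y vec hmin hf
    match fuel with
    | f + 1 =>
      -- each axis allows a step
      have hax : ∀ p d, cdBound p d = some ((m : Int) + 1) ∨ (∃ k, cdBound p d = some k ∧ (m : Int) + 1 ≤ k) ∨ cdBound p d = none →
          0 ≤ p + d ∧ p + d < 5 := by
        intro p d hp
        rcases hp with hp | ⟨k, hp, hk⟩ | hp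
        · by_contra hc; have := (cdBound_zero_iff hp).mpr hc; omega
        · by_contra hc; have := (cdBound_zero_iff hp).mpr hc; omega
        · obtain ⟨hd, h0, h5⟩ := (cdBound_none_iff p d).mp hp; omega
      have hcx : 0 ≤ x + dx ∧ x + dx < 5 := by
        rcases cdMin_some_cases hmin with ⟨hx, _⟩ | ⟨_, hx | ⟨k, hx, hk⟩⟩
        · exact hax x dx (Or.inl (by exact_mod_cast hx))
        · exact hax x dx (Or.inr (Or.inr hx))
        · exact hax x dx (Or.inr (Or.inl ⟨k, hx, by exact_mod_cast hk⟩))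
      have hcy : 0 ≤ y + dy ∧ y + dy < 5 := by
        rcases cdMin_some_cases hmin with ⟨_, hy | ⟨k, hy, hk⟩⟩ | ⟨hy, _⟩
        · exact hax y dy (Or.inr (Or.inr hy))
        · exact hax y dy (Or.inr (Or.inl ⟨k, hy, by exact_mod_cast hk⟩))
        · exact hax y dy (Or.inl (by exact_mod_cast hy))
      -- the combined bound decreases by one
      have hmin' : cdMin (cdBound (x + dx) dx) (cdBound (y + dy) dy) = some (m : Int) := by
        have step : ∀ p d, (cdBound p d = none → cdBound (p + d) d = none) := by
          intro p d hp
          obtain ⟨hd, h0, h5⟩ := (cdBound_none_iff p d).mp hp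
          rw [cdBound_none_iff]; omega
        rcases hux : cdBound x dx with _ | u <;> rcases huy : cdBound y dy with _ | v
        · simp [cdMin, hux, huy] at hmin
        · rw [hux, huy] at hmin; simp [cdMin] at hmin
          have hv : 0 < v := by omega
          rw [step x dx hux, cdBound_step huy hv]
          simp [cdMin]; omega
        · rw [hux, huy] at hmin; simp [cdMin] at hmin
          have hu : 0 < u := by omega
          rw [step y dy huy, cdBound_step hux hu]
          simp [cdMin]; omega
        · rw [hux, huy] at hmin; simp [cdMin] at hmin
          have hu : 0 < u := by
            have := cdBound_bounds hux; have := cdBound_bounds huy; omega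
          have hv : 0 < v := by
            have := cdBound_bounds hux; have := cdBound_bounds huy; omega
          rw [cdBound_step hux hu, cdBound_step huy hv]
          simp [cdMin]; omega
      have := ih f (x + dx) (y + dy) (vec ++ [[x + dx, y + dy]]) hmin' (by omega)
      simp only [check_diag_loop, if_pos (And.intro hcx hcy)]
      rw [this]
      have hrange : (List.range (m + 1)).map
            (fun (i : Nat) => ([x + ((i : Int) + 1) * dx, y + ((i : Int) + 1) * dy] : List Int)) =
          [x + dx, y + dy] ::
            (List.range m).map (fun (i : Nat) => [x + dx + ((i : Int) + 1) * dx, y + dy + ((i : Int) + 1) * dy]) := by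
        rw [List.range_succ_eq_map, List.map_cons, List.map_map]
        congr 1
        · norm_num
        · apply List.map_congr_left
          intro i _
          simp only [Function.comp_apply, List.cons.injEq, and_true]
          push_cast
          constructor
          · ring
          · ring
      rw [hrange]
      simp [List.append_assoc]

lemma cdMin_isSome_of_pre (a b dx dy : Int) (hpre : Pre_check_diag a b dx dy) :
    ∃ n : Int, cdMin (cdBound a dx) (cdBound b dy) = some n := by
  rcases hux : cdBound a dx with _ | u <;> rcases huy : cdBound b dy with _ | v
  · obtain ⟨h1, h2, h3⟩ := (cdBound_none_iff a dx).mp hux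
    obtain ⟨h4, h5, h6⟩ := (cdBound_none_iff b dy).mp huy
    exact absurd ⟨h1, h4, h2, h3, h5, h6⟩ hpre
  · exact ⟨v, by simp [cdMin]⟩
  · exact ⟨u, by simp [cdMin]⟩
  · exact ⟨min u v, by simp [cdMin]⟩

lemma alt_eq (a b dx dy n : Int)
    (hmin : cdMin (cdBound a dx) (cdBound b dy) = some n) :
    check_diag_alt a b dx dy =
      (List.range n.toNat).map (fun (i : Nat) => [a + ((i : Int) + 1) * dx, b + ((i : Int) + 1) * dy]) := by
  unfold check_diag_alt
  have hn : (match cdBound a dx, cdBound b dy with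
    | some u, some v => min u v
    | some u, none   => u
    | none,   some v => v
    | none,   none   => (0 : Int)) = n := by
    rcases hux : cdBound a dx with _ | u <;> rcases huy : cdBound b dy with _ | v <;>
      rw [hux, huy] at hmin <;> simp [cdMin] at hmin ⊢ <;> omega
  simp only [hn]
  rw [PySem.List.pyRange_one]
  rw [List.map_map]
  have : (n + 1 - 1).toNat = n.toNat := by omega
  rw [this]
  apply List.map_congr_left
  intro i _
  simp only [Function.comp_apply, List.cons.injEq, and_true]
  constructor
  · ring
  · ring

-- ===== VERDICT (by name: the statement is the Claim_ definition above) =====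
theorem check_diag_spec : Claim_equal_check_diag := by
  intro a b dx dy _ hpre
  unfold Spec_check_diag check_diag
  obtain ⟨n, hmin⟩ := cdMin_isSome_of_pre a b dx dy hpre
  have hn0 : 0 ≤ n ∧ n ≤ 5 := by
    rcases cdMin_some_cases hmin with ⟨hx, _⟩ | ⟨hy, _⟩
    · exact cdBound_bounds hx
    · exact cdBound_bounds hy
  have hcast : ((n.toNat : Int)) = n := by omega
  rw [loop_eq dx dy n.toNat 6 a b [] (by rw [hcast]; exact hmin) (by omega),
      alt_eq a b dx dy n hmin]
  simp
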